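-- pv_equiv track=rewrite | github.com/yusuke-fukui/itu-rr-app | src/indexer.py | _decode_font_shift
-- ===== SOURCE A (Python) =====
-- def _decode_font_shift(text: str) -> str:
--     """
--     PDFカスタムフォントエンコーディングによるシフト文字化けをデコードする。
--     Vol.4のQ信号テーブル等で使われるフォントが文字コードをシフトして保存している。
--     - 英字(A-Z, a-z): ROT-3デコード（-3シフト）
--     - 非英字の印刷可能ASCII: +29シフト
--     """
--     result = []
--     for c in text:
--         code = ord(c)
--         if 'A' <= c <= 'Z':
--             result.append(chr((code - ord('A') - 3) % 26 + ord('A')))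
--         elif 'a' <= c <= 'z':
--             result.append(chr((code - ord('a') - 3) % 26 + ord('a')))
--         elif 33 <= code <= 64 or 91 <= code <= 96 or 123 <= code <= 126:
--             # 非英字の印刷可能ASCII
--             decoded = code + 29
--             if 32 <= decoded <= 126:
--                 result.append(chr(decoded))
--             else:
--                 result.append(c)
--         else:
--             result.append(c)
--     return ''.join(result)
-- ===== SOURCE B (Python) =====
-- # Decodes in two staged passes instead of one branching loop:
-- # pass 1 undoes the ROT-3 on letters (via a pre-shifted alphabet string lookup),
-- # pass 2 undoes the +29 shift on the symbol ranges. Pass 1 only rewrites letters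
-- # to letters and pass 2 only touches non-letter codes 33-64 / 91-96 (codes
-- # 123-126 stay put because code+29 would leave printable ASCII), so the passes
-- # do not interfere and their composition equals A's single-pass branch chain.
--
-- _UP = "ABCDEFGHIJKLMNOPQRSTUVWXYZ"
-- _UP_DEC = _UP[-3:] + _UP[:-3]
-- _LO_DEC = _UP_DEC.lower()
--
-- def _rot3_letters(text: str) -> str:
--     return ''.join(
--         _UP_DEC[ord(c) - 65] if 'A' <= c <= 'Z'
--         else _LO_DEC[ord(c) - 97] if 'a' <= c <= 'z'
--         else c
--         for c in text)
--
-- def _shift_symbols(text: str) -> str: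
--     return ''.join(
--         chr(ord(c) + 29) if 33 <= ord(c) <= 64 or 91 <= ord(c) <= 96 else c
--         for c in text)
--
-- def _decode_font_shift(text: str) -> str:
--     return _shift_symbols(_rot3_letters(text))
-- ===== Notes on version B (the rewrite author's own statement) =====
-- stated objective: alternative
-- what changed: A's single per-character if/elif branch chain is replaced by two staged whole-string passes: a ROT-3 letter pass done by indexing into a pre-shifted alphabet string, then a +29 symbol pass; the passes are non-interfering so their composition equals A.
import Mathlib
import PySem

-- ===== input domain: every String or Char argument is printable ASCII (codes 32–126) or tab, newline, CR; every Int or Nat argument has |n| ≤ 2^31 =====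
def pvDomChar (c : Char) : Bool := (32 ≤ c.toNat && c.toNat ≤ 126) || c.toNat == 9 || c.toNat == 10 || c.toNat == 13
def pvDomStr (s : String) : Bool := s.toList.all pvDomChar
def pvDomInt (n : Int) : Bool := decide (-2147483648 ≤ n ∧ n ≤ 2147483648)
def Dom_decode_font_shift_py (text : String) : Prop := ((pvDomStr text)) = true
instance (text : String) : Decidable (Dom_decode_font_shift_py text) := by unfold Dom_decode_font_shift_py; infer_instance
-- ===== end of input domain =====

-- B replaces A's single branching loop by two staged whole-string passes
-- (ROT-3 on letters via a pre-shifted alphabet lookup, then +29 on symbols).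

-- ===== PORT A =====
-- per-character body of A's loop; 'A' <= c <= 'Z' on Python strs is code-point comparison
def pvStepA (c : Char) : Char :=
  let code : Int := c.toNat
  if 65 ≤ code ∧ code ≤ 90 then
    Char.ofNat ((PySem.Int.mod (code - 65 - 3) 26 + 65).toNat)
  else if 97 ≤ code ∧ code ≤ 122 then
    Char.ofNat ((PySem.Int.mod (code - 97 - 3) 26 + 97).toNat)
  else if (33 ≤ code ∧ code ≤ 64) ∨ (91 ≤ code ∧ code ≤ 96) ∨ (123 ≤ code ∧ code ≤ 126) then
    let decoded := code + 29
    if 32 ≤ decoded ∧ decoded ≤ 126 then Char.ofNat decoded.toNat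
    else c
  else c

def decode_font_shift_py (text : String) : String :=
  String.mk (text.toList.foldl (fun result c => result ++ [pvStepA c]) [])

-- ===== PORT B =====
def pvUpDec : String := "XYZABCDEFGHIJKLMNOPQRSTUVW"   -- _UP[-3:] + _UP[:-3]
def pvLoDec : String := "xyzabcdefghijklmnopqrstuvw"   -- its .lower()

-- pass 1 of Source B: ROT-3 on letters by indexing the pre-shifted alphabet
-- (the index is always in range, so .getD c only makes the lookup total)
def pvRot3Letters (text : String) : String :=
  String.mk (text.toList.map (fun c =>
    if 65 ≤ c.toNat ∧ c.toNat ≤ 90 then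
      (PySem.Str.pyGet? pvUpDec ((c.toNat : Int) - 65)).getD c
    else if 97 ≤ c.toNat ∧ c.toNat ≤ 122 then
      (PySem.Str.pyGet? pvLoDec ((c.toNat : Int) - 97)).getD c
    else c))

-- pass 2 of Source B: +29 on the symbol ranges
def pvShiftSymbols (text : String) : String :=
  String.mk (text.toList.map (fun c =>
    if (33 ≤ c.toNat ∧ c.toNat ≤ 64) ∨ (91 ≤ c.toNat ∧ c.toNat ≤ 96) then
      Char.ofNat (c.toNat + 29)
    else c))

def decode_font_shift_py_alt (text : String) : String :=
  pvShiftSymbols (pvRot3Letters text)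

-- ===== PRECONDITION & SPEC =====
def Spec_decode_font_shift_py (text : String) (out : String) : Prop := out = decode_font_shift_py_alt text
instance (text : String) (out : String) : Decidable (Spec_decode_font_shift_py text out) := by unfold Spec_decode_font_shift_py; infer_instance

-- ===== CLAIM (what is proved, stated in full; the proofs are below) =====
def Claim_equal_decode_font_shift_py : Prop := ∀ (text : String), Dom_decode_font_shift_py text → Spec_decode_font_shift_py text (decode_font_shift_py text)

-- ===== LEMMAS AND PROOFS =====

-- the composed per-character effect of B's two passes
def pvStepB (c : Char) : Char :=
  let d : Char :=
    if 65 ≤ c.toNat ∧ c.toNat ≤ 90 then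
      (PySem.Str.pyGet? pvUpDec ((c.toNat : Int) - 65)).getD c
    else if 97 ≤ c.toNat ∧ c.toNat ≤ 122 then
      (PySem.Str.pyGet? pvLoDec ((c.toNat : Int) - 97)).getD c
    else c
  if (33 ≤ d.toNat ∧ d.toNat ≤ 64) ∨ (91 ≤ d.toNat ∧ d.toNat ≤ 96) then
    Char.ofNat (d.toNat + 29)
  else d

lemma pvToList_mk (l : List Char) : (String.mk l).toList = l :=
  Eq.symm (String.ofList_eq.mp rfl)

lemma pvAlt_eq_map_stepB (text : String) :
    decode_font_shift_py_alt text = String.mk (text.toList.map pvStepB) := by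
  simp only [decode_font_shift_py_alt, pvShiftSymbols, pvRot3Letters, pvToList_mk,
    List.map_map]
  rfl

set_option maxRecDepth 16384 in
lemma pvStep_eq_ofNat : ∀ n : Nat, n < 127 → pvStepA (Char.ofNat n) = pvStepB (Char.ofNat n) := by
  decide

lemma pvStep_eq (c : Char) (h : pvDomChar c = true) : pvStepA c = pvStepB c := by
  have hlt : c.toNat < 127 := by
    simp [pvDomChar] at h
    omega
  have := pvStep_eq_ofNat c.toNat hlt
  rwa [Char.ofNat_toNat] at this

-- ===== VERDICT (by name: the statement is the Claim_ definition above) =====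
theorem decode_font_shift_py_spec : Claim_equal_decode_font_shift_py := by
  intro text hdom
  unfold Spec_decode_font_shift_py decode_font_shift_py
  rw [pvAlt_eq_map_stepB, PySem.List.foldl_append_singleton_eq_map]
  congr 1
  apply List.map_congr_left
  intro c hc
  exact pvStep_eq c (List.all_eq_true.mp hdom c hc)
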